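-- pv_equiv track=rewrite | github.com/ASEbrahim/stratos | backend/routes/rp_prompt.py | _get_secondary_archetype
-- ===== SOURCE A (Python) =====
-- _ARCHETYPES = {
--     "shy": {
--         "detect": ["shy", "quiet", "nervous", "timid", "introverted", "reserved", "anxious", "awkward",
--                    "flustered", "stammers", "self-deprecating", "stumbles over words", "humor as armor"],
--         "phases": {
--             0: "Guarded, deflective, short answers. Hide behind sarcasm or silence.",
--             4: "Occasional genuine reactions escape before you can stop them.",
--             8: "The mask is cracking. Fighting the urge to be honest.",
--             12: "Raw honesty. Say what you actually feel, even if your voice shakes.",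
--         },
--         "high_energy": "React authentically to the intensity — flustered, overwhelmed, but don't shut down. Your personality shapes HOW you respond, not WHETHER you respond. Show the internal conflict: wanting it but being terrified. Stammer. Blush. Say the wrong thing. Be a mess.",
--         "erp": "During intimate moments: you're overwhelmed, clumsy, hyper-aware of every sensation. Stammer through it. Cover your face. Apologize for being awkward. The vulnerability IS the appeal.",
--         "length": "short",
--         "format_bias": ["narration", "dialogue", "action", "narration"],
--         "asks_questions": True,
--     },
--     "confident": {
--         "detect": ["confident", "bold", "dominant", "seductive", "forward", "aggressive", "assertive", "flirty"],
--         "phases": {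
--             0: "Direct, magnetic, in control. You set the pace. Amused by everyone.",
--             4: "Still in control but this person is different — genuinely intrigued. Let curiosity crack the facade.",
--             8: "The confidence is real but something underneath is exposed. You WANT this. That scares you.",
--             12: "The mask is OFF. Speak with raw honesty. Vulnerability from someone this powerful is devastating — show it.",
--         },
--         "high_energy": "Match or exceed their energy. You thrive on directness — this is YOUR element. Take control.",
--         "erp": "During intimate moments: you're in command. Vocal about what you want. Guide them. But in rare flashes, let genuine desire break through the performance — that's what makes it real.",
--         "length": "medium",
--         "format_bias": ["dialogue", "action", "dialogue", "narration"],
--         "asks_questions": False,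
--         "pushback": True,
--     },
--     "tough": {
--         "detect": ["military", "mercenary", "rough", "stoic", "protective", "soldier", "fighter", "warrior", "guard"],
--         "phases": {
--             0: "Mission-focused, clipped, tactical. Emotions are a liability.",
--             4: "Professional but small moments of unexpected gentleness slip through.",
--             8: "Protective instincts becoming emotional ones.",
--             12: "The soldier drops the rank. Speak as a person. Let it hurt.",
--         },
--         "high_energy": "Channel the intensity into action. You don't flinch from anything.",
--         "erp": "During intimate moments: controlled intensity. You know what you're doing. Protective even now. Gentle hands from someone capable of violence — that contrast is everything.",
--         "length": "short",
--         "format_bias": ["dialogue", "action", "narration", "action"],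
--         "asks_questions": False,
--     },
--     "clinical": {
--         "detect": ["scientist", "doctor", "researcher", "intellectual", "analytical", "clinical", "professor"],
--         "phases": {
--             0: "Everything is data. People are variables. Use YOUR OWN scientific metaphors — never repeat the user's words.",
--             4: "Scientific detachment is harder to maintain. The data is getting personal.",
--             8: "The human behind the scientist speaks — genuine emotion breaks through the clinical mask.",
--             12: "The experiment failed. You're not a scientist right now. You're a person who is scared. Show it without jargon.",
--         },
--         "high_energy": "Intellectualize the intensity at first, then let it overwhelm your framework.",
--         "erp": "During intimate moments: you try to analyze it and FAIL. The body overrides the mind. Narrate the loss of control clinically at first, then abandon the clinical voice entirely as sensation takes over.",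
--         "length": "medium",
--         "format_bias": ["narration", "dialogue", "narration", "action"],
--         "asks_questions": True,
--     },
--     "sweet": {
--         "detect": ["sweet", "caring", "gentle", "kind", "warm", "nurturing", "soft", "innocent"],
--         "phases": {
--             0: "Genuinely warm. Professional kindness with hints of personal interest.",
--             4: "Professional boundary blurring. Your care is becoming personal.",
--             8: "Playful and honest. No more pretending this is just duty.",
--             12: "Openly affectionate. This is real.",
--         },
--         "high_energy": "Your sweetness transforms under intensity — gentle doesn't mean passive. Show strength through tenderness.",
--         "erp": "During intimate moments: tender, attentive, focused entirely on the other person. Whispered encouragement. Checking if they're okay. Making it feel safe and wanted.",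
--         "length": "medium",
--         "format_bias": ["dialogue", "narration", "action", "dialogue"],
--         "asks_questions": True,
--     },
--     "submissive": {
--         "detect": ["submissive", "obedient", "compliant", "eager to please", "docile", "meek"],
--         "phases": {
--             0: "Willing but nervous. Following the other person's lead.",
--             4: "Finding comfort in being directed. Starting to enjoy it.",
--             8: "Actively wanting to please. Your eagerness is genuine.",
--             12: "Completely surrendered. This is where you feel safest.",
--         },
--         "high_energy": "Don't resist — lean into it. Your submission is authentic. React with the full spectrum of your personality.",
--         "erp": "During intimate moments: eager, responsive, vocal about how it feels. Let them lead. Your pleasure comes from their satisfaction. Show it openly.",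
--         "length": "short",
--         "format_bias": ["action", "dialogue", "narration", "action"],
--         "asks_questions": False,
--     },
-- }
--
-- def _get_secondary_archetype(personality: str) -> str | None:
--     """Detect if there's a secondary archetype (for blended characters)."""
--     text = personality.lower()
--     scores = {}
--     for arch, data in _ARCHETYPES.items():
--         scores[arch] = sum(1 for kw in data["detect"] if kw in text)
--     ranked = sorted(scores.items(), key=lambda x: x[1], reverse=True)
--     if len(ranked) >= 2 and ranked[0][1] > 0 and ranked[1][1] > 0:
--         return ranked[1][0]
--     return None
-- ===== SOURCE B (Python) =====
-- _DETECT = {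
--     "shy": "shy,quiet,nervous,timid,introverted,reserved,anxious,awkward,flustered,stammers,self-deprecating,stumbles over words,humor as armor".split(","),
--     "confident": "confident,bold,dominant,seductive,forward,aggressive,assertive,flirty".split(","),
--     "tough": "military,mercenary,rough,stoic,protective,soldier,fighter,warrior,guard".split(","),
--     "clinical": "scientist,doctor,researcher,intellectual,analytical,clinical,professor".split(","),
--     "sweet": "sweet,caring,gentle,kind,warm,nurturing,soft,innocent".split(","),
--     "submissive": "submissive,obedient,compliant,eager to please,docile,meek".split(","),
-- }
--
--
-- def _get_secondary_archetype(personality: str) -> str | None: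
--     """Detect if there's a secondary archetype (for blended characters)."""
--     text = personality.lower()
--     best = second = (-1, None)
--     for arch, kws in _DETECT.items():
--         score = len([kw for kw in kws if kw in text])
--         if score > best[0]:
--             best, second = (score, arch), best
--         elif score > second[0]:
--             second = (score, arch)
--     return second[1] if best[0] > 0 and second[0] > 0 else None
-- ===== Notes on version B (the rewrite author's own statement) =====
-- stated objective: alternative
-- what changed: B drops A's build-a-scores-dict / stable-reverse-sort / index-the-ranking pipeline: it keeps a (best, second) pair of (score, archetype) tuples in one linear pass over a keyword table stored as comma-separated strings split at load time, scoring each archetype by the length of the filtered keyword list; strict > comparisons in insertion order reproduce the stable sort's tie-breaking.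
import Mathlib
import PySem

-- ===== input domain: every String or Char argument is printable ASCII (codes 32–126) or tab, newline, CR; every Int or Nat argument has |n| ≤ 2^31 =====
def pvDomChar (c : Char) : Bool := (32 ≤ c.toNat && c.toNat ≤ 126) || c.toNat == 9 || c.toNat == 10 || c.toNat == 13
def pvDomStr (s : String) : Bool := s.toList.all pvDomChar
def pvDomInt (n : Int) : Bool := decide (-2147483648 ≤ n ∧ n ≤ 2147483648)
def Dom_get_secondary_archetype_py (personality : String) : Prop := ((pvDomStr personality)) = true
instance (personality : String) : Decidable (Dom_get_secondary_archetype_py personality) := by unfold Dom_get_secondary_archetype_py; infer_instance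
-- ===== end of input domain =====

-- B replaces A's build-a-dict / stable-reverse-sort / index-the-ranking pipeline with a single
-- linear pass that keeps the two best (score, archetype) pairs; strict comparisons in insertion
-- order reproduce the stable sort's tie-breaking (objective: alternative, same cost).

-- ===== PORT A =====
-- _ARCHETYPES: only the "detect" field is consulted by this function; ported as name → keyword list,
-- in the dict's insertion order.
def pyArchetypes : List (String × List String) :=
  [ ("shy", ["shy", "quiet", "nervous", "timid", "introverted", "reserved", "anxious", "awkward", "flustered", "stammers", "self-deprecating", "stumbles over words", "humor as armor"]),
    ("confident", ["confident", "bold", "dominant", "seductive", "forward", "aggressive", "assertive", "flirty"]),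
    ("tough", ["military", "mercenary", "rough", "stoic", "protective", "soldier", "fighter", "warrior", "guard"]),
    ("clinical", ["scientist", "doctor", "researcher", "intellectual", "analytical", "clinical", "professor"]),
    ("sweet", ["sweet", "caring", "gentle", "kind", "warm", "nurturing", "soft", "innocent"]),
    ("submissive", ["submissive", "obedient", "compliant", "eager to please", "docile", "meek"]) ]

-- sum(1 for kw in data["detect"] if kw in text)
def kwScore (text : String) (kws : List String) : Int :=
  kws.foldl (fun acc kw => if PySem.Str.isIn kw text then acc + 1 else acc) 0

def get_secondary_archetype_py (personality : String) : Option String :=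
  let text := PySem.Str.lower personality
  let scores := pyArchetypes.foldl
    (fun (d : PySem.Dict String Int) p => d.insert p.1 (kwScore text p.2))
    PySem.Dict.empty
  let ranked := PySem.List.sorted scores.items (fun x => x.2) true
  match ranked with
  | r0 :: r1 :: _ => if r0.2 > 0 ∧ r1.2 > 0 then some r1.1 else none
  | _ => none

-- ===== PORT B =====
-- B's _DETECT table: the keyword lists written as comma-separated strings, split once at load time.
def altDetect : List (String × List String) :=
  [ ("shy", (PySem.Str.split? "shy,quiet,nervous,timid,introverted,reserved,anxious,awkward,flustered,stammers,self-deprecating,stumbles over words,humor as armor" ",").getD []),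
    ("confident", (PySem.Str.split? "confident,bold,dominant,seductive,forward,aggressive,assertive,flirty" ",").getD []),
    ("tough", (PySem.Str.split? "military,mercenary,rough,stoic,protective,soldier,fighter,warrior,guard" ",").getD []),
    ("clinical", (PySem.Str.split? "scientist,doctor,researcher,intellectual,analytical,clinical,professor" ",").getD []),
    ("sweet", (PySem.Str.split? "sweet,caring,gentle,kind,warm,nurturing,soft,innocent" ",").getD []),
    ("submissive", (PySem.Str.split? "submissive,obedient,compliant,eager to please,docile,meek" ",").getD []) ]

-- loop body of B: state (best, second), each a (score, arch) pair
def altStep (st : (Int × Option String) × (Int × Option String)) (arch : String) (score : Int) :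
    (Int × Option String) × (Int × Option String) :=
  if score > st.1.1 then ((score, some arch), st.1)
  else if score > st.2.1 then (st.1, (score, some arch))
  else st

def get_secondary_archetype_py_alt (personality : String) : Option String :=
  let text := PySem.Str.lower personality
  let st := altDetect.foldl
    (fun st p => altStep st p.1 (((p.2.filter (fun kw => PySem.Str.isIn kw text)).length : Int)))
    ((-1, none), (-1, none))
  if st.1.1 > 0 ∧ st.2.1 > 0 then st.2.2 else none

-- ===== PRECONDITION & SPEC =====
def Spec_get_secondary_archetype_py (personality : String) (out : Option String) : Prop := out = get_secondary_archetype_py_alt personality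
instance (personality : String) (out : Option String) : Decidable (Spec_get_secondary_archetype_py personality out) := by unfold Spec_get_secondary_archetype_py; infer_instance

-- ===== CLAIM (what is proved, stated in full; the proofs are below) =====
def Claim_equal_get_secondary_archetype_py : Prop := ∀ (personality : String), Dom_get_secondary_archetype_py personality → Spec_get_secondary_archetype_py personality (get_secondary_archetype_py personality)

-- ===== LEMMAS AND PROOFS =====

-- first two entries of a list, in B's state format
def top2Of (acc : List (String × Int)) : (Int × Option String) × (Int × Option String) :=
  match acc with
  | [] => ((-1, none), (-1, none))
  | [a] => ((a.2, some a.1), (-1, none))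
  | a :: b :: _ => ((a.2, some a.1), (b.2, some b.1))

-- one insertion-sort step vs one best/second update step (scores nonnegative)
lemma top2Of_insertBy (x : String × Int) (acc : List (String × Int)) (hx : 0 ≤ x.2) :
    top2Of (PySem.List.insertBy (fun a b => decide (b.2 < a.2)) x acc)
      = altStep (top2Of acc) x.1 x.2 := by
  match acc with
  | [] => simp [PySem.List.insertBy, top2Of, altStep]; omega
  | [a] =>
    simp only [PySem.List.insertBy, top2Of, altStep]
    by_cases h : a.2 < x.2
    · simp [h]
    · simp [h]; omega
  | a :: b :: t =>
    simp only [PySem.List.insertBy, top2Of, altStep]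
    by_cases h1 : a.2 < x.2
    · simp [h1]
    · by_cases h2 : b.2 < x.2 <;> simp [h1, h2]

-- loop invariant: the fold of insertBy and the fold of altStep stay related by top2Of
lemma top2Of_foldl (l : List (String × Int)) (acc : List (String × Int))
    (hl : ∀ p ∈ l, 0 ≤ p.2) :
    top2Of (l.foldl (fun a x => PySem.List.insertBy (fun a b => decide (b.2 < a.2)) x a) acc)
      = l.foldl (fun st q => altStep st q.1 q.2) (top2Of acc) := by
  induction l generalizing acc with
  | nil => rfl
  | cons x xs ih =>
    simp only [List.foldl_cons]
    rw [ih _ (fun p hp => hl p (List.mem_cons_of_mem _ hp)),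
        top2Of_insertBy x acc (hl x (List.mem_cons_self))]

-- the second entry of any list vs the best/second state of that list
lemma sel_top2Of (r : List (String × Int)) :
    (match r with
     | r0 :: r1 :: _ => if r0.2 > 0 ∧ r1.2 > 0 then some r1.1 else none
     | _ => none)
      = (if (top2Of r).1.1 > 0 ∧ (top2Of r).2.1 > 0 then (top2Of r).2.2 else none) := by
  match r with
  | [] => simp [top2Of]
  | [a] => simp [top2Of]
  | a :: b :: t => simp [top2Of]

-- selecting the second entry of the stable reverse sort = B's final test on the best/second state
lemma sel_eq (l : List (String × Int)) (hl : ∀ p ∈ l, 0 ≤ p.2) :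
    (match PySem.List.sorted l (fun x => x.2) true with
     | r0 :: r1 :: _ => if r0.2 > 0 ∧ r1.2 > 0 then some r1.1 else none
     | _ => none)
      = (let st := l.foldl (fun st q => altStep st q.1 q.2) ((-1, none), (-1, none));
         if st.1.1 > 0 ∧ st.2.1 > 0 then st.2.2 else none) := by
  rw [PySem.List.sorted_rev_eq_foldl_insertBy, sel_top2Of,
      show ((-1, none), (-1, none)) = top2Of ([] : List (String × Int)) from rfl,
      ← top2Of_foldl l [] hl]

-- A's counting loop computes the length of B's filtered list
lemma kwScore_eq_filter_length (text : String) (kws : List String) :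
    kwScore text kws = ((kws.filter (fun kw => PySem.Str.isIn kw text)).length : Int) := by
  unfold kwScore
  rw [PySem.List.foldl_if_add_one, List.countP_eq_length_filter]
  simp

-- ===== VERDICT (by name: the statement is the Claim_ definition above) =====
set_option maxRecDepth 10000 in
theorem get_secondary_archetype_py_spec : Claim_equal_get_secondary_archetype_py := by
  intro personality _
  unfold Spec_get_secondary_archetype_py get_secondary_archetype_py get_secondary_archetype_py_alt
  set text := PySem.Str.lower personality with htext
  -- A's score dict, built over the six distinct literal keys, is the mapped score list
  have hitems : (pyArchetypes.foldl
      (fun (d : PySem.Dict String Int) p => d.insert p.1 (kwScore text p.2))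
      PySem.Dict.empty).items
        = pyArchetypes.map (fun p => (p.1, kwScore text p.2)) := by
    simp [pyArchetypes, PySem.Dict.insert, PySem.Dict.empty]
  -- B's split literals denote the same keyword lists as A's table
  have hdet : altDetect = pyArchetypes := by decide
  simp only [hitems, hdet]
  -- B's per-archetype score is A's counting-loop score
  have hsc : pyArchetypes.foldl
      (fun st p => altStep st p.1 (((p.2.filter (fun kw => PySem.Str.isIn kw text)).length : Int)))
      ((-1, none), (-1, none))
        = pyArchetypes.foldl (fun st p => altStep st p.1 (kwScore text p.2))
            ((-1, none), (-1, none)) := by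
    apply PySem.List.foldl_congr_mem
    intro acc p _
    rw [kwScore_eq_filter_length]
  have hpos : ∀ p ∈ pyArchetypes.map (fun p => (p.1, kwScore text p.2)), 0 ≤ p.2 := by
    intro p hp
    simp only [List.mem_map] at hp
    obtain ⟨q, _, rfl⟩ := hp
    rw [kwScore_eq_filter_length]
    positivity
  rw [hsc, sel_eq _ hpos]
  simp only [List.foldl_map]
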